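-- pv_equiv track=rewrite | github.com/scottmm374/My_Advent_solutions | Advent/2015/Day_1:_Not_Quite_Lisp/main.py | Not_Quite_Lisp_P1
-- ===== SOURCE A (Python) =====
-- def Not_Quite_Lisp_P1(data):
--
--     floor = 0
--
--     for x in range(len(data)):
--
--         if data[x] == '(':
--             floor += 1
--         else:
--             floor -= 1
--
--     return floor
-- ===== SOURCE B (Python) =====
-- def Not_Quite_Lisp_P1(data):
--     # closed form: each '(' contributes +1, every other char -1
--     return 2 * data.count('(') - len(data)
-- ===== Notes on version B (the rewrite author's own statement) =====
-- stated objective: simpler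
-- what changed: Replaced the index loop with a running counter by the closed-form expression 2*data.count('(') - len(data), since every non-'(' character contributes -1.
import Mathlib
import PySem

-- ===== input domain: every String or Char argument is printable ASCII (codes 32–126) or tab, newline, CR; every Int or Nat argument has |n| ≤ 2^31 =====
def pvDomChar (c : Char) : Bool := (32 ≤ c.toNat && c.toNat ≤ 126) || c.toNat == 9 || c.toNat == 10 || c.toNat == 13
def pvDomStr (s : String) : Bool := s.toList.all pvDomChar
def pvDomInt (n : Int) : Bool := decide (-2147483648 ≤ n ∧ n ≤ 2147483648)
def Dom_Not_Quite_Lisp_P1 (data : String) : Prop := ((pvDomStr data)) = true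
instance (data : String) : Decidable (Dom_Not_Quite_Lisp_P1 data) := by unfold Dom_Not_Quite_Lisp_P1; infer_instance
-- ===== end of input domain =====

-- B replaces A's indexed accumulating loop by the closed form 2*count('(') - len(data) (objective: simpler).

-- ===== PORT A =====
-- for x in range(len(data)): floor += 1 if data[x] == '(' else floor -= 1
def Not_Quite_Lisp_P1 (data : String) : Int :=
  (PySem.List.pyRange 0 (PySem.Str.len data) 1).foldl
    (fun floor x => if PySem.Str.pyGet? data x == some '(' then floor + 1 else floor - 1) 0

-- ===== PORT B =====
def Not_Quite_Lisp_P1_alt (data : String) : Int :=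
  2 * (PySem.Str.count data "(" : Int) - PySem.Str.len data

-- ===== PRECONDITION & SPEC =====
def Spec_Not_Quite_Lisp_P1 (data : String) (out : Int) : Prop := out = Not_Quite_Lisp_P1_alt data
instance (data : String) (out : Int) : Decidable (Spec_Not_Quite_Lisp_P1 data out) := by unfold Spec_Not_Quite_Lisp_P1; infer_instance

-- ===== CLAIM (what is proved, stated in full; the proofs are below) =====
def Claim_equal_Not_Quite_Lisp_P1 : Prop := ∀ (data : String), Dom_Not_Quite_Lisp_P1 data → Spec_Not_Quite_Lisp_P1 data (Not_Quite_Lisp_P1 data)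

-- ===== LEMMAS AND PROOFS =====

-- Chars.count.go for a single-character needle counts that character.
theorem countGo_singleton (c : Char) (cs : List Char) (fuel : Nat) (acc : Nat)
    (h : cs.length ≤ fuel) :
    PySem.Chars.count.go [c] fuel cs acc = acc + cs.count c := by
  induction cs generalizing fuel acc with
  | nil => cases fuel <;> simp [PySem.Chars.count.go]
  | cons x t ih =>
    cases fuel with
    | zero => simp at h
    | succ f =>
      simp only [List.length_cons, Nat.add_le_add_iff_right] at h
      by_cases hx : c = x
      · subst hx
        simp [PySem.Chars.count.go, List.isPrefixOf, ih f (acc + 1) h,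
              List.count_cons_self, Nat.add_assoc, Nat.add_comm 1]
      · simp [PySem.Chars.count.go, List.isPrefixOf, hx, ih f acc h, Ne.symm hx]

theorem count_singleton (c : Char) (cs : List Char) :
    PySem.Chars.count cs [c] = cs.count c := by
  simp [PySem.Chars.count, countGo_singleton c cs cs.length 0 le_rfl]

-- A's loop over indices, restated as a closed form on the character list.
theorem loopA_closed (cs : List Char) :
    ∀ a : Int,
      (List.range cs.length).foldl
        (fun floor k => if cs[k]? == some '(' then floor + 1 else floor - 1) a
      = a + 2 * (cs.count '(' : Int) - cs.length := by
  induction cs using List.reverseRecOn with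
  | nil => intro a; simp
  | append_singleton xs x ih =>
    intro a
    rw [List.length_append, List.length_singleton, List.range_succ, List.foldl_append]
    have hstep : (List.range xs.length).foldl
        (fun floor k => if (xs ++ [x])[k]? == some '(' then floor + 1 else floor - 1) a
        = (List.range xs.length).foldl
        (fun floor k => if xs[k]? == some '(' then floor + 1 else floor - 1) a := by
      apply PySem.List.foldl_congr_mem
      intro b k hk
      rw [List.mem_range] at hk
      rw [List.getElem?_append_left hk]
    simp only [List.foldl_cons, List.foldl_nil, hstep, ih]
    rw [List.getElem?_append_right le_rfl]
    by_cases hx : x = '('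
    · subst hx; simp [List.count_append]; ring
    · simp [List.count_append, hx, beq_iff_eq]
      ring

-- ===== VERDICT (by name: the statement is the Claim_ definition above) =====
theorem Not_Quite_Lisp_P1_spec : Claim_equal_Not_Quite_Lisp_P1 := by
  intro data _
  unfold Spec_Not_Quite_Lisp_P1 Not_Quite_Lisp_P1 Not_Quite_Lisp_P1_alt
  have : ("(" : String).toList = ['('] := rfl
  simp only [PySem.Str.count_eq, this, count_singleton, PySem.Str.len_eq]
  rw [show PySem.List.pyRange 0 (data.toList.length : Int) 1
        = (List.range data.toList.length).map (fun k : Nat => (k : Int)) from ?_]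
  · rw [List.foldl_map]
    simp only [PySem.Str.pyGet?_natCast]
    have := loopA_closed data.toList 0
    simpa using this
  · rw [PySem.List.pyRange_one]
    simp
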